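-- pv_equiv track=rewrite | github.com/kunalJa/leetcodeforces-etc | Codeforces/977/977C_less_or_equal.py | kth_largest_integer
-- ===== SOURCE A (Python) =====
-- def kth_largest_integer(k: int, sequence) -> int:
--     sequence.sort()
--     if k == 0:
--         kth = sequence[0] - 1
--     else:
--         kth = sequence[k - 1]
--
--     count = 0
--     for num in sequence:
--         if num <= kth:
--             count += 1
--
--     if count == k and kth > 0:
--         return kth
--
--     return -1
-- ===== SOURCE B (Python) =====
-- def kth_largest_integer(k: int, sequence) -> int:
--     # Note: unlike A, B does not sort `sequence` in place (return value only).
--     if k < 0: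
--         return -1
--     n = len(sequence)
--     if k > n or (k == 0 and n == 0):
--         return -1
--     if k == 0:
--         kth = min(sequence) - 1
--     else:
--         # iterative quickselect for the k-th smallest (1-indexed), middle element as pivot
--         xs, j = sequence, k
--         while True:
--             pivot = xs[len(xs) // 2]
--             less = [x for x in xs if x < pivot]
--             if j <= len(less):
--                 xs = less
--                 continue
--             greater = [x for x in xs if x > pivot]
--             eq = len(xs) - len(less) - len(greater)
--             if j <= len(less) + eq:
--                 kth = pivot
--                 break
--             j -= len(less) + eq
--             xs = greater
--     count = sum(1 for x in sequence if x <= kth)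
--     return kth if count == k and kth > 0 else -1
-- ===== Notes on version B (the rewrite author's own statement) =====
-- stated objective: alternative
-- what changed: B replaces the full sort with an iterative middle-pivot quickselect for the k-th smallest (plus min() for k==0) followed by one counting pass, and never sorts or mutates the input list.
import Mathlib
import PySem

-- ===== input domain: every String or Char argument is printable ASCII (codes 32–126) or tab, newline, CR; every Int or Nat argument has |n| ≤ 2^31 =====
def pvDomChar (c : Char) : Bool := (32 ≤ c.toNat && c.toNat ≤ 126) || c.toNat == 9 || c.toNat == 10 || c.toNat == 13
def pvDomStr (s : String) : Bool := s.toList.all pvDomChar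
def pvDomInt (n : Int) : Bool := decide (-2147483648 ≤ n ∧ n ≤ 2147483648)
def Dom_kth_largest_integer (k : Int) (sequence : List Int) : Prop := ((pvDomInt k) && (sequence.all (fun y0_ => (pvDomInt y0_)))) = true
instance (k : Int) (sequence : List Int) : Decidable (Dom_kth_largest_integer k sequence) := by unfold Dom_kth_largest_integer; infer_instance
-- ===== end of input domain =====

-- B replaces A's full sort with an iterative middle-pivot quickselect plus one counting pass (objective:
-- alternative algorithm; return-value equivalence only — A sorts `sequence` in place, B does not mutate it).


-- ===== PORT A =====
def kth_largest_integer (k : Int) (sequence : List Int) : Int :=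
  let s := PySem.List.sorted sequence (fun x => x) false
  let kth := if k = 0 then PySem.List.pyGetD s 0 0 - 1 else PySem.List.pyGetD s (k - 1) 0
  let count := s.foldl (fun c num => if num ≤ kth then c + 1 else c) (0 : Int)
  if count = k ∧ kth > 0 then kth else -1

-- ===== PORT B =====
-- iterative quickselect loop of Source B (middle element as pivot); `[] => 0` is unreachable under the call's bounds
def pvSelect (xs : List Int) (j : Int) : Int :=
  match xs with
  | [] => 0
  | a :: t =>
    let full := a :: t
    let pivot := full[full.length / 2]'(Nat.div_lt_self (Nat.succ_pos _) (by omega))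
    let less := full.filter (fun x => x < pivot)
    if j ≤ (less.length : Int) then pvSelect less j
    else
      let greater := full.filter (fun x => pivot < x)
      let eq : Int := (full.length : Int) - (less.length : Int) - (greater.length : Int)
      if j ≤ (less.length : Int) + eq then pivot
      else pvSelect greater (j - (less.length : Int) - eq)
termination_by xs.length
decreasing_by
  all_goals exact List.length_filter_lt_length_iff_exists.2 ⟨(a :: t)[(a :: t).length / 2]'(Nat.div_lt_self (Nat.succ_pos _) (by omega)), List.getElem_mem _, by simp⟩

def kth_largest_integer_alt (k : Int) (sequence : List Int) : Int :=
  if k < 0 then -1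
  else if (sequence.length : Int) < k ∨ (k = 0 ∧ sequence = []) then -1
  else
    let kth := if k = 0 then (PySem.List.min? sequence (fun x => x)).getD 0 - 1
               else pvSelect sequence k
    let count := sequence.foldl (fun c x => if x ≤ kth then c + 1 else c) (0 : Int)
    if count = k ∧ kth > 0 then kth else -1

-- ===== PRECONDITION & SPEC =====
-- Pre_ excludes exactly the inputs where A raises IndexError (out-of-range [possibly negative] index)
def Pre_kth_largest_integer (k : Int) (sequence : List Int) : Prop :=
  (k = 0 ∧ sequence ≠ []) ∨ (1 ≤ k ∧ k ≤ (sequence.length : Int)) ∨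
    (k < 0 ∧ 1 - k ≤ (sequence.length : Int))
instance (k : Int) (sequence : List Int) : Decidable (Pre_kth_largest_integer k sequence) := by
  unfold Pre_kth_largest_integer; infer_instance

def pvWitness_kth_largest_integer : Int × List Int := (1, [3])

def Spec_kth_largest_integer (k : Int) (sequence : List Int) (out : Int) : Prop :=
  out = kth_largest_integer_alt k sequence
instance (k : Int) (sequence : List Int) (out : Int) : Decidable (Spec_kth_largest_integer k sequence out) := by
  unfold Spec_kth_largest_integer; infer_instance

-- ===== CLAIM (what is proved, stated in full; the proofs are below) =====
def Claim_equal_kth_largest_integer : Prop := ∀ (k : Int) (sequence : List Int), Dom_kth_largest_integer k sequence → Pre_kth_largest_integer k sequence → Spec_kth_largest_integer k sequence (kth_largest_integer k sequence)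

-- ===== LEMMAS AND PROOFS =====

-- all-equal lists are pairwise ≤
theorem pv_pairwise_const (l : List Int) (p : Int) (h : ∀ x ∈ l, x = p) : l.Pairwise (· ≤ ·) := by
  induction l with
  | nil => exact List.Pairwise.nil
  | cons a t ih =>
    refine List.Pairwise.cons (fun b hb => ?_) (ih (fun x hx => h x (List.mem_cons_of_mem _ hx)))
    rw [h a List.mem_cons_self, h b (List.mem_cons_of_mem _ hb)]

theorem pv_middle (l1 l2 l3 : List Int) (a : Int) :
    (l1 ++ (a :: l2) ++ l3).Perm (a :: (l1 ++ l2 ++ l3)) := by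
  have h1 : l1 ++ (a :: l2) ++ l3 = l1 ++ a :: (l2 ++ l3) := by simp
  rw [h1]
  simpa [List.append_assoc] using List.perm_middle (a := a) (l₁ := l1) (l₂ := l2 ++ l3)

-- the three filters partition the list
theorem pv_partition_perm (xs : List Int) (p : Int) :
    (xs.filter (fun x => x < p) ++ xs.filter (fun x => x = p) ++ xs.filter (fun x => p < x)).Perm xs := by
  induction xs with
  | nil => simp
  | cons a t ih =>
    rcases lt_trichotomy a p with h | h | h
    · simpa [List.filter_cons, h, h.ne, not_lt.2 h.le] using ih.cons a
    · subst h
      simp only [List.filter_cons, decide_eq_true_eq, lt_irrefl, decide_true, if_true, if_false,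
        decide_false, ite_false]
      exact (pv_middle _ _ _ a).trans (ih.cons a)
    · have hne : ¬ (a = p) := by omega
      simp only [List.filter_cons, decide_eq_true_eq, not_lt.2 h.le, h, hne, decide_true,
        decide_false, if_true, if_false, ite_false, ite_true, lt_asymm h]
      exact (List.perm_middle.trans (by simp)).trans (ih.cons a)

theorem pv_partition_length (xs : List Int) (p : Int) :
    xs.length = (xs.filter (fun x => x < p)).length + (xs.filter (fun x => x = p)).length
      + (xs.filter (fun x => p < x)).length := by
  have h := (pv_partition_perm xs p).length_eq
  simp only [List.length_append] at h
  omega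

-- the sorted list decomposes around any p into <p, =p, >p blocks
theorem pv_sorted_partition (xs : List Int) (p : Int) :
    PySem.List.sorted xs (fun x => x) false =
      PySem.List.sorted (xs.filter (fun x => x < p)) (fun x => x) false
        ++ xs.filter (fun x => x = p)
        ++ PySem.List.sorted (xs.filter (fun x => p < x)) (fun x => x) false := by
  refine PySem.List.sorted_id_eq_of_perm_of_pairwise xs _ ?_ ?_
  · exact (((PySem.List.sorted_perm _ _ _).append (List.Perm.refl _)).append
      (PySem.List.sorted_perm _ _ _)).trans (pv_partition_perm xs p)
  · refine (List.pairwise_append).2 ⟨(List.pairwise_append).2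
      ⟨PySem.List.sorted_pairwise _ _, pv_pairwise_const _ p (fun x hx => ?_), fun x hx y hy => ?_⟩,
      PySem.List.sorted_pairwise _ _, fun x hx y hy => ?_⟩
    · exact by simpa using (List.mem_filter.1 hx).2
    · have hxp : x < p := by simpa using (List.mem_filter.1 ((PySem.List.mem_sorted _ _ _ _).1 hx)).2
      have hyp : y = p := by simpa using (List.mem_filter.1 hy).2
      omega
    · rcases List.mem_append.1 hx with hx | hx
      · have h1 : x < p := by simpa using (List.mem_filter.1 ((PySem.List.mem_sorted _ _ _ _).1 hx)).2
        have h2 : p < y := by simpa using (List.mem_filter.1 ((PySem.List.mem_sorted _ _ _ _).1 hy)).2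
        omega
      · have h1 : x = p := by simpa using (List.mem_filter.1 hx).2
        have h2 : p < y := by simpa using (List.mem_filter.1 ((PySem.List.mem_sorted _ _ _ _).1 hy)).2
        omega

theorem pv_filter_getElem_eq (xs : List Int) (p : Int) (i : Nat)
    (h : i < (xs.filter (fun x => x = p)).length) : (xs.filter (fun x => x = p))[i] = p := by
  simpa using (List.mem_filter.1 (List.getElem_mem h)).2

theorem pv_getD_left (l1 l2 : List Int) (i : Nat) (d : Int) (h : i < l1.length) :
    (l1 ++ l2).getD i d = l1.getD i d := by
  rw [List.getD_eq_getElem?_getD, List.getElem?_append_left h, ← List.getD_eq_getElem?_getD]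

theorem pv_getD_right (l1 l2 l3 : List Int) (i : Nat) (d : Int) (h : l1.length + l2.length ≤ i) :
    (l1 ++ l2 ++ l3).getD i d = l3.getD (i - l1.length - l2.length) d := by
  rw [List.getD_eq_getElem?_getD, List.getElem?_append_right (by simp; omega),
    ← List.getD_eq_getElem?_getD, List.length_append]
  congr 1
  omega

-- getD on a concatenation, middle block
theorem pv_getD_mid (l1 l2 l3 : List Int) (i : Nat) (d : Int) (hlo : l1.length ≤ i)
    (hhi : i - l1.length < l2.length) :
    (l1 ++ l2 ++ l3).getD i d = l2[i - l1.length]'hhi := by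
  rw [List.getD_eq_getElem?_getD, List.getElem?_append_left (by simp; omega),
    List.getElem?_append_right hlo, List.getElem?_eq_getElem hhi]
  rfl

-- quickselect returns the (j-1)-th element of the sorted list
theorem pvSelect_eq_sorted (xs : List Int) (j : Int) (h1 : 1 ≤ j) (h2 : j ≤ (xs.length : Int)) :
    pvSelect xs j = (PySem.List.sorted xs (fun x => x) false).getD (j - 1).toNat 0 := by
  revert h1 h2
  induction xs, j using pvSelect.induct with
  | case1 j =>
    intro h1 h2
    simp at h2
    omega
  | case2 j a t full pivot less hle ih =>
    intro h1 h2
    simp only [full, pivot, less] at hle ih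
    rw [pvSelect]
    split_ifs with hc
    · rw [ih h1 hc,
        pv_sorted_partition (a :: t) ((a :: t)[(a :: t).length / 2]'(Nat.div_lt_self (Nat.succ_pos _) (by omega))),
        List.append_assoc, pv_getD_left _ _ _ _ (by rw [PySem.List.length_sorted]; omega)]
    · exact absurd hle hc
  | case3 j a t full pivot less hle greater eq heq =>
    intro h1 h2
    simp only [full, pivot, less, greater, eq] at hle heq
    rw [pvSelect]
    split_ifs with hc1
    · exact absurd hc1 hle
    · have hlen := pv_partition_length (a :: t)
        ((a :: t)[(a :: t).length / 2]'(Nat.div_lt_self (Nat.succ_pos _) (by omega)))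
      simp only [] at *
      rw [pv_sorted_partition (a :: t)
          ((a :: t)[(a :: t).length / 2]'(Nat.div_lt_self (Nat.succ_pos _) (by omega))),
        pv_getD_mid _ _ _ _ _ (by rw [PySem.List.length_sorted]; omega)
          (by rw [PySem.List.length_sorted]; omega)]
      split_ifs with hc2
      · exact (pv_filter_getElem_eq _ _ _ _).symm
      · exact absurd heq hc2
  | case4 j a t full pivot less hle greater eq heq ih =>
    intro h1 h2
    simp only [full, pivot, less, greater, eq] at hle heq ih
    have hlen := pv_partition_length (a :: t)
      ((a :: t)[(a :: t).length / 2]'(Nat.div_lt_self (Nat.succ_pos _) (by omega)))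
    rw [pvSelect]
    split_ifs with hc1
    · exact absurd hc1 hle
    · simp only [] at *
      split_ifs with hc2
      · exact absurd hc2 heq
      · rw [ih (by omega) (by omega),
          pv_sorted_partition (a :: t)
            ((a :: t)[(a :: t).length / 2]'(Nat.div_lt_self (Nat.succ_pos _) (by omega))),
          pv_getD_right _ _ _ _ _ (by rw [PySem.List.length_sorted]; omega)]
        congr 1
        rw [PySem.List.length_sorted]
        omega

-- A = B on Pre_, as one equation first
theorem pv_main (k : Int) (sequence : List Int) (hpre : Pre_kth_largest_integer k sequence) :
    kth_largest_integer k sequence = kth_largest_integer_alt k sequence := by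
  have hsp := PySem.List.sorted_perm sequence (fun x => x) false
  have hcnt : ∀ m : Int, (PySem.List.sorted sequence (fun x => x) false).countP
      (fun x => decide (x ≤ m)) = sequence.countP (fun x => decide (x ≤ m)) :=
    fun m => hsp.countP_eq _
  rcases hpre with ⟨hk0, hne⟩ | ⟨hk1, hk2⟩ | ⟨hkneg, hlen⟩
  · -- k = 0, sequence nonempty: both return min-1 when positive, else -1
    subst hk0
    obtain ⟨m, ts, hs⟩ : ∃ m ts, PySem.List.sorted sequence (fun x => x) false = m :: ts := by
      cases hsq : PySem.List.sorted sequence (fun x => x) false with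
      | nil => exact absurd ((PySem.List.sorted_eq_nil_iff _ _ _).1 hsq) hne
      | cons m ts => exact ⟨m, ts, rfl⟩
    have hmin : ∀ y ∈ sequence, m ≤ y := PySem.List.key_head_sorted_le sequence (fun x => x) hs
    obtain ⟨mn, hmn⟩ : ∃ mn, PySem.List.min? sequence (fun x => x) = some mn := by
      cases hm : PySem.List.min? sequence (fun x => x) with
      | none => exact absurd ((PySem.List.min?_eq_none_iff _ _).1 hm) hne
      | some mn => exact ⟨mn, rfl⟩
    have hmeq : mn = m :=
      le_antisymm
        (PySem.List.min?_isMin hmn m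
          (by rw [← PySem.List.mem_sorted sequence (fun x => x) false, hs]; exact List.mem_cons_self))
        (hmin mn (PySem.List.min?_mem hmn))
    have hc0 : sequence.countP (fun x => decide (x ≤ m - 1)) = 0 := by
      rw [List.countP_eq_zero]
      intro x hx
      have := hmin x hx
      simp
      omega
    simp only [kth_largest_integer, kth_largest_integer_alt, hs, hmn, hmeq, if_pos rfl,
      PySem.List.pyGetD_zero_cons, PySem.List.foldl_ite_add_one, lt_irrefl, ite_false,
      Option.getD_some]
    rw [← hs, hcnt]
    simp only [if_true, zero_add]
    rw [hc0]
    simp [hne, show ¬((sequence.length : Int) < 0) from by omega]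
  · -- 1 ≤ k ≤ len: same kth element (quickselect = sorted index) and same count
    have hsel := pvSelect_eq_sorted sequence k hk1 (by simpa using hk2)
    have hget : PySem.List.pyGetD (PySem.List.sorted sequence (fun x => x) false) (k - 1) 0 =
        (PySem.List.sorted sequence (fun x => x) false).getD (k - 1).toNat 0 := by
      rw [PySem.List.pyGetD_eq_getElem _ _ (by omega)
        (by rw [PySem.List.length_sorted]; omega)]
      rw [List.getD_eq_getElem?_getD, List.getElem?_eq_getElem (by rw [PySem.List.length_sorted]; omega)]
      rfl
    simp only [kth_largest_integer, kth_largest_integer_alt, PySem.List.foldl_ite_add_one,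
      if_neg (by omega : ¬ k = 0), if_neg (by omega : ¬ k < 0),
      if_neg (by push_neg; exact ⟨by omega, fun h => absurd h (by omega)⟩ :
        ¬ ((sequence.length : Int) < k ∨ (k = 0 ∧ sequence = [])))]
    rw [hget, ← hsel, hcnt]
  · -- k < 0: A's count is nonnegative so never equals k; B returns -1 directly
    have hcp : (0 : Int) ≤ ((PySem.List.sorted sequence (fun x => x) false).countP
        (fun x => decide (x ≤ PySem.List.pyGetD (PySem.List.sorted sequence (fun x => x) false) (k - 1) 0)) : Int) := by positivity
    simp only [kth_largest_integer, kth_largest_integer_alt, PySem.List.foldl_ite_add_one,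
      if_neg (by omega : ¬ k = 0), if_pos hkneg]
    rw [if_neg]
    rintro ⟨hcnt', -⟩
    omega

-- ===== VERDICT (by name: the statement is the Claim_ definition above) =====
theorem kth_largest_integer_spec : Claim_equal_kth_largest_integer := by
  intro k sequence _ hpre
  exact pv_main k sequence hpre
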